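-- pv_equiv track=rewrite | github.com/eabadir/EGPT | content/pyFRAQTL/pyFRAQTLsdk.py | best_rational_approx
-- ===== SOURCE A (Python) =====
-- from typing import Optional, Tuple, List, Dict, Union
--
-- def continued_fraction(num: int, den: int) -> List[int]:
--     cf = []
--     while den:
--         a = num // den
--         cf.append(a)
--         num, den = den, num - a * den
--     return cf
--
-- def convergents(cf: List[int]) -> List[Tuple[int,int]]:
--     if not cf:
--         return []
--     conv: List[Tuple[int,int]] = []
--     p0, p1 = 1, cf[0]
--     q0, q1 = 0, 1
--     conv.append((p1, q1))
--     for a in cf[1:]: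
--         p2 = a * p1 + p0
--         q2 = a * q1 + q0
--         conv.append((p2, q2))
--         p0, p1 = p1, p2
--         q0, q1 = q1, q2
--     return conv
--
-- def best_rational_approx(phase_num: int, phase_den: int, max_den: int) -> Optional[Tuple[int,int]]:
--     cf = continued_fraction(phase_num, phase_den)
--     best: Optional[Tuple[int,int]] = None
--     for p, q in convergents(cf):
--         if q <= max_den:
--             best = (p, q)
--         else:
--             break
--     return best
-- ===== SOURCE B (Python) =====
-- from typing import Optional, Tuple
--
-- def best_rational_approx(phase_num: int, phase_den: int, max_den: int) -> Optional[Tuple[int, int]]: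
--     num, den = phase_num, phase_den
--     if den == 0:
--         return None
--     if max_den < 1:
--         return None
--     a = num // den
--     num, den = den, num - a * den
--     p0, p1, q0, q1 = 1, a, 0, 1
--     best = (p1, q1)
--     while den:
--         a = num // den
--         num, den = den, num - a * den
--         p2 = a * p1 + p0
--         q2 = a * q1 + q0
--         if q2 > max_den:
--             break
--         best = (p2, q2)
--         p0, p1, q0, q1 = p1, p2, q1, q2
--     return best
-- ===== Notes on version B (the rewrite author's own statement) =====
-- stated objective: simpler
-- what changed: Replaced the three-stage pipeline (build the full continued-fraction list, materialise the full convergent list, scan it) by one fused loop that runs the Euclidean step and the convergent recurrence together and stops as soon as the denominator bound is exceeded, never building intermediate lists.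
import Mathlib
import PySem

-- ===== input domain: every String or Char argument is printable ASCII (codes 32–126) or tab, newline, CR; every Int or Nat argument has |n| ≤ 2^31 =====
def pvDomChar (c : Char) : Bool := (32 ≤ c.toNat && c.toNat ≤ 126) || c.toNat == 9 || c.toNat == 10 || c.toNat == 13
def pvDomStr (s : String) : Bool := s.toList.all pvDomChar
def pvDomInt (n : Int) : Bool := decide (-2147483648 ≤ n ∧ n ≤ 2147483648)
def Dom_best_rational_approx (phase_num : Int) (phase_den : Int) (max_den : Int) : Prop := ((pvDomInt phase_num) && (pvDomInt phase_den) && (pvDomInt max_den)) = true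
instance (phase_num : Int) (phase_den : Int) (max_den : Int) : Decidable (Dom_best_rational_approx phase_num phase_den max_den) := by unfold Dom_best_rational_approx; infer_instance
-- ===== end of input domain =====

-- B fuses A's three stages (CF list, convergent list, scan) into one early-exiting loop; objective: simpler (O(1) memory, no intermediate lists).

-- Euclidean remainder shrinks in absolute value (used for termination of both ports)
theorem pvRemAbs_lt (num den : Int) (h : den ≠ 0) :
    (num - PySem.Int.floordiv num den * den).natAbs < den.natAbs := by
  have hfm := PySem.Int.floordiv_mul_add_mod num den
  have heq : num - PySem.Int.floordiv num den * den = PySem.Int.mod num den := by omega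
  rw [heq]
  rcases lt_or_gt_of_ne h with hneg | hpos
  · have := PySem.Int.mod_neg_bounds num hneg
    omega
  · have h1 := PySem.Int.mod_nonneg num hpos
    have h2 := PySem.Int.mod_lt num hpos
    omega

-- ===== PORT A =====
def pyCF (num den : Int) : List Int :=
  if h : den = 0 then []
  else
    let a := PySem.Int.floordiv num den
    a :: pyCF den (num - a * den)
termination_by den.natAbs
decreasing_by exact pvRemAbs_lt num den h

def pyConvergents (cf : List Int) : List (Int × Int) :=
  match cf with
  | [] => []
  | c0 :: rest =>
    (List.foldl
      (fun (st : List (Int × Int) × Int × Int × Int × Int) a =>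
        let (conv, p0, p1, q0, q1) := st
        let p2 := a * p1 + p0
        let q2 := a * q1 + q0
        (conv ++ [(p2, q2)], p1, p2, q1, q2))
      ([(c0, 1)], 1, c0, 0, 1) rest).1

def pyBestLoop (convs : List (Int × Int)) (max_den : Int) (best : Option (Int × Int)) : Option (Int × Int) :=
  match convs with
  | [] => best
  | (p, q) :: rest => if q ≤ max_den then pyBestLoop rest max_den (some (p, q)) else best

def best_rational_approx (phase_num : Int) (phase_den : Int) (max_den : Int) : Option (Int × Int) :=
  pyBestLoop (pyConvergents (pyCF phase_num phase_den)) max_den none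

-- ===== PORT B =====
def altLoop (num den p0 p1 q0 q1 max_den : Int) (best : Int × Int) : Int × Int :=
  if h : den = 0 then best
  else
    let a := PySem.Int.floordiv num den
    let p2 := a * p1 + p0
    let q2 := a * q1 + q0
    if q2 > max_den then best
    else altLoop den (num - a * den) p1 p2 q1 q2 max_den (p2, q2)
termination_by den.natAbs
decreasing_by exact pvRemAbs_lt num den h

def best_rational_approx_alt (phase_num : Int) (phase_den : Int) (max_den : Int) : Option (Int × Int) :=
  if phase_den = 0 then none
  else if max_den < 1 then none
  else
    let a := PySem.Int.floordiv phase_num phase_den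
    some (altLoop phase_den (phase_num - a * phase_den) 1 a 0 1 max_den (a, 1))

-- ===== PRECONDITION & SPEC =====
def Spec_best_rational_approx (phase_num : Int) (phase_den : Int) (max_den : Int) (out : Option (Int × Int)) : Prop := out = best_rational_approx_alt phase_num phase_den max_den
instance (phase_num : Int) (phase_den : Int) (max_den : Int) (out : Option (Int × Int)) : Decidable (Spec_best_rational_approx phase_num phase_den max_den out) := by unfold Spec_best_rational_approx; infer_instance

-- ===== CLAIM (what is proved, stated in full; the proofs are below) =====
def Claim_equal_best_rational_approx : Prop := ∀ (phase_num : Int) (phase_den : Int) (max_den : Int), Dom_best_rational_approx phase_num phase_den max_den → Spec_best_rational_approx phase_num phase_den max_den (best_rational_approx phase_num phase_den max_den)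

-- ===== LEMMAS AND PROOFS =====

-- the convergents generated from a CF tail, starting from state (p0,p1,q0,q1)
def convTail (p0 p1 q0 q1 : Int) (rest : List Int) : List (Int × Int) :=
  match rest with
  | [] => []
  | a :: t => (a * p1 + p0, a * q1 + q0) :: convTail p1 (a * p1 + p0) q1 (a * q1 + q0) t

theorem foldl_conv (rest : List Int) (conv : List (Int × Int)) (p0 p1 q0 q1 : Int) :
    (List.foldl
      (fun (st : List (Int × Int) × Int × Int × Int × Int) a =>
        let (conv, p0, p1, q0, q1) := st
        let p2 := a * p1 + p0
        let q2 := a * q1 + q0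
        (conv ++ [(p2, q2)], p1, p2, q1, q2))
      (conv, p0, p1, q0, q1) rest).1 = conv ++ convTail p0 p1 q0 q1 rest := by
  induction rest generalizing conv p0 p1 q0 q1 with
  | nil => simp [convTail]
  | cons a t ih =>
      simp only [List.foldl_cons, convTail]
      rw [ih]
      simp

theorem pyConvergents_cons (c0 : Int) (rest : List Int) :
    pyConvergents (c0 :: rest) = (c0, 1) :: convTail 1 c0 0 1 rest := by
  simp [pyConvergents, foldl_conv]

theorem main_aux (n : Nat) : ∀ (num den p0 p1 q0 q1 max_den : Int), den.natAbs ≤ n →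
    pyBestLoop (convTail p0 p1 q0 q1 (pyCF num den)) max_den (some (p1, q1)) =
      some (altLoop num den p0 p1 q0 q1 max_den (p1, q1)) := by
  induction n with
  | zero =>
      intro num den p0 p1 q0 q1 max_den hle
      have hd : den = 0 := by omega
      subst hd
      rw [pyCF, altLoop]
      simp [convTail, pyBestLoop]
  | succ n ih =>
      intro num den p0 p1 q0 q1 max_den hle
      by_cases hd : den = 0
      · subst hd
        rw [pyCF, altLoop]
        simp [convTail, pyBestLoop]
      · rw [pyCF, altLoop]
        simp only [hd, dite_false]
        set a := PySem.Int.floordiv num den with ha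
        simp only [convTail, pyBestLoop]
        by_cases hq : a * q1 + q0 ≤ max_den
        · have hr : (num - a * den).natAbs ≤ n := by
            have h2 := pvRemAbs_lt num den hd
            rw [← ha] at h2
            omega
          rw [if_pos hq, if_neg (by omega)]
          exact ih den (num - a * den) p1 (a * p1 + p0) q1 (a * q1 + q0) max_den hr
        · rw [if_neg hq, if_pos (by omega)]

theorem main_eq (num den p0 p1 q0 q1 max_den : Int) :
    pyBestLoop (convTail p0 p1 q0 q1 (pyCF num den)) max_den (some (p1, q1)) =
      some (altLoop num den p0 p1 q0 q1 max_den (p1, q1)) :=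
  main_aux den.natAbs num den p0 p1 q0 q1 max_den (le_refl _)

-- ===== VERDICT (by name: the statement is the Claim_ definition above) =====
theorem best_rational_approx_spec : Claim_equal_best_rational_approx := by
  intro num den max_den _
  unfold Spec_best_rational_approx best_rational_approx best_rational_approx_alt
  by_cases hd : den = 0
  · subst hd
    rw [pyCF]
    simp [pyConvergents, pyBestLoop]
  · rw [pyCF]
    simp only [hd, dite_false]
    rw [pyConvergents_cons]
    simp only [pyBestLoop, if_neg hd]
    by_cases hm : max_den < 1
    · rw [if_neg (by omega : ¬ (1:Int) ≤ max_den)]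
      simp [hm]
    · rw [if_pos (by omega : (1:Int) ≤ max_den)]
      simp only [if_neg hm]
      exact main_eq den (num - PySem.Int.floordiv num den * den) 1 (PySem.Int.floordiv num den) 0 1 max_den
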